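-- pv_equiv track=rewrite | github.com/byrejaxxmodz/integrationcloudfleet | app/quota_rules.py | get_expected_sedes
-- ===== SOURCE A (Python) =====
-- QUOTA_MATRIX = {
--     ("CCM LINDE", "BARRANQUILLA"): [2, 2, 2, 2, 2, 2, 0],
--     ("CCM LINDE", "BOGOTA"): [7, 7, 7, 7, 7, 7, 3],
--     ("CCM LINDE", "CARTAGENA"): [2, 2, 2, 2, 2, 2, 0],
--     ("CCM LINDE", "IBAGUE"): [2, 2, 2, 2, 2, 2, 0],
--     ("CCM LINDE", "MEDELLIN"): [7, 7, 7, 7, 7, 7, 1],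
--     ("CCM LINDE", "PEREIRA"): [4, 4, 4, 4, 4, 4, 0],
--     ("CCM LINDE", "POPAYAN"): [0, 0, 0, 0, 0, 0, 0],
--     ("CCM LINDE", "SOGAMOSO"): [0, 0, 0, 0, 0, 0, 0],
--     ("CCM LINDE", "TOCANCIPA"): [5, 5, 5, 5, 5, 5, 0],
--     ("CCM LINDE", "YUMBO"): [5, 5, 5, 5, 5, 5, 0],
--
--     # Alias CCM PRAXAIR -> CCM LINDE
--     ("CCM PRAXAIR", "BARRANQUILLA"): [2, 2, 2, 2, 2, 2, 0],
--     ("CCM PRAXAIR", "BOGOTA"): [7, 7, 7, 7, 7, 7, 3],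
--     ("CCM PRAXAIR", "CARTAGENA"): [2, 2, 2, 2, 2, 2, 0],
--     ("CCM PRAXAIR", "IBAGUE"): [2, 2, 2, 2, 2, 2, 0],
--     ("CCM PRAXAIR", "MEDELLIN"): [7, 7, 7, 7, 7, 7, 1],
--     ("CCM PRAXAIR", "PEREIRA"): [4, 4, 4, 4, 4, 4, 0],
--     ("CCM PRAXAIR", "POPAYAN"): [0, 0, 0, 0, 0, 0, 0],
--     ("CCM PRAXAIR", "SOGAMOSO"): [0, 0, 0, 0, 0, 0, 0],
--     ("CCM PRAXAIR", "TOCANCIPA"): [5, 5, 5, 5, 5, 5, 0],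
--     ("CCM PRAXAIR", "YUMBO"): [5, 5, 5, 5, 5, 5, 0],
--
--     # CCM CHILCO - Asumimos 2 2 2 2 2 2 2 para Cazuca y Florencia
--     ("CCM CHILCO", "CAZUCA"): [2, 2, 2, 2, 2, 2, 2],
--     ("CCM CHILCO", "FLORENCIA"): [2, 2, 2, 2, 2, 2, 2],
--     ("CCM CHILCO", "GIRARDOT"): [1, 1, 1, 1, 1, 1, 1],
--     ("CCM CHILCO", "HISPANIA"): [1, 1, 1, 1, 1, 1, 1],
--     ("CCM CHILCO", "MADRID"): [1, 1, 1, 1, 1, 1, 1],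
--     ("CCM CHILCO", "MARINILLA"): [2, 2, 2, 2, 2, 2, 2],
--     ("CCM CHILCO", "NEIVA"): [3, 3, 3, 3, 3, 3, 3],
--     ("CCM CHILCO", "YUMBO"): [1, 1, 1, 1, 1, 1, 1],
--
--     # Alias CHILCO (nombre corto) -> CCM CHILCO
--     ("CHILCO", "CAZUCA"): [2, 2, 2, 2, 2, 2, 2],
--     ("CHILCO", "FLORENCIA"): [2, 2, 2, 2, 2, 2, 2],
--     ("CHILCO", "GIRARDOT"): [1, 1, 1, 1, 1, 1, 1],
--     ("CHILCO", "HISPANIA"): [1, 1, 1, 1, 1, 1, 1],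
--     ("CHILCO", "MADRID"): [1, 1, 1, 1, 1, 1, 1],
--     ("CHILCO", "MARINILLA"): [2, 2, 2, 2, 2, 2, 2],
--     ("CHILCO", "NEIVA"): [3, 3, 3, 3, 3, 3, 3],
--     ("CHILCO", "YUMBO"): [1, 1, 1, 1, 1, 1, 1],
-- }
--
-- def get_expected_sedes(cliente_nombre: str) -> list[str]:
--     """
--     Retorna la lista de nombres de sedes configuradas en la matriz para un cliente dado.
--     """
--     if not cliente_nombre:
--         return []
--
--     c_key = cliente_nombre.upper().strip()
--     sedes = set()
--
--     # Busqueda Unidireccional: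
--     # Solo si el nombre del API contiene la clave (ej: "CCM LINDE SAS" contiene "CCM LINDE")
--     # Para casos cortos como "CHILCO", usamos el alias explicito en la matriz.
--     for (k_cli, k_sede) in QUOTA_MATRIX.keys():
--         if k_cli in c_key:
--             sedes.add(k_sede)
--
--     return sorted(list(sedes))
-- ===== SOURCE B (Python) =====
-- # Decision-table formulation: two substring tests select one of four
-- # precomputed sorted answers; no loop, no set, no runtime sort.
-- _LINDE_SORTED = ["BARRANQUILLA", "BOGOTA", "CARTAGENA", "IBAGUE", "MEDELLIN",
--                  "PEREIRA", "POPAYAN", "SOGAMOSO", "TOCANCIPA", "YUMBO"]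
-- _CHILCO_SORTED = ["CAZUCA", "FLORENCIA", "GIRARDOT", "HISPANIA", "MADRID",
--                   "MARINILLA", "NEIVA", "YUMBO"]
-- _BOTH_SORTED = ["BARRANQUILLA", "BOGOTA", "CARTAGENA", "CAZUCA", "FLORENCIA",
--                 "GIRARDOT", "HISPANIA", "IBAGUE", "MADRID", "MARINILLA",
--                 "MEDELLIN", "NEIVA", "PEREIRA", "POPAYAN", "SOGAMOSO",
--                 "TOCANCIPA", "YUMBO"]
--
-- def get_expected_sedes(cliente_nombre: str) -> list[str]:
--     if not cliente_nombre:
--         return []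
--     c_key = cliente_nombre.upper().strip()
--     # "CCM CHILCO" in c_key implies "CHILCO" in c_key, so one test covers both keys.
--     linde = ("CCM LINDE" in c_key) or ("CCM PRAXAIR" in c_key)
--     chilco = "CHILCO" in c_key
--     if linde and chilco:
--         return list(_BOTH_SORTED)
--     if linde:
--         return list(_LINDE_SORTED)
--     if chilco:
--         return list(_CHILCO_SORTED)
--     return []
-- ===== Notes on version B (the rewrite author's own statement) =====
-- stated objective: faster
-- what changed: B replaces A's 36-pair matrix scan with set accumulation and a final sort by a decision table: two boolean substring tests (linde-family, and 'CHILCO' which subsumes 'CCM CHILCO') select one of four precomputed sorted literal lists, so B has no loop over the matrix, no set, and no runtime sort.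
import Mathlib
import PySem

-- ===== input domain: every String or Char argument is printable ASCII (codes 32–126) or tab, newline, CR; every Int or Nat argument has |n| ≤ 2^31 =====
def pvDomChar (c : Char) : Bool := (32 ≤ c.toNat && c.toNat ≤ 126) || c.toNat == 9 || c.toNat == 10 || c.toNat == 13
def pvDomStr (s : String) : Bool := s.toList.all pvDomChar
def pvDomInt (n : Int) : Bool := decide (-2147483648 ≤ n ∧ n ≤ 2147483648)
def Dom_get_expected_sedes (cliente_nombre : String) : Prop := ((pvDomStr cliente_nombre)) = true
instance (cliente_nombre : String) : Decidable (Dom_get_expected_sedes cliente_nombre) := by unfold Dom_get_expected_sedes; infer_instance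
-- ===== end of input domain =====

-- B replaces A's matrix scan + set + sort with a decision table: two substring
-- tests select one of four precomputed sorted literal lists (objective: faster,
-- constant-factor); return values proved equal.


-- ===== PORT A =====
-- QUOTA_MATRIX keys (only the keys matter to get_expected_sedes), in insertion order
def quotaMatrixKeys : List (String × String) :=
  [("CCM LINDE", "BARRANQUILLA"), ("CCM LINDE", "BOGOTA"), ("CCM LINDE", "CARTAGENA"),
   ("CCM LINDE", "IBAGUE"), ("CCM LINDE", "MEDELLIN"), ("CCM LINDE", "PEREIRA"),
   ("CCM LINDE", "POPAYAN"), ("CCM LINDE", "SOGAMOSO"), ("CCM LINDE", "TOCANCIPA"),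
   ("CCM LINDE", "YUMBO"),
   ("CCM PRAXAIR", "BARRANQUILLA"), ("CCM PRAXAIR", "BOGOTA"), ("CCM PRAXAIR", "CARTAGENA"),
   ("CCM PRAXAIR", "IBAGUE"), ("CCM PRAXAIR", "MEDELLIN"), ("CCM PRAXAIR", "PEREIRA"),
   ("CCM PRAXAIR", "POPAYAN"), ("CCM PRAXAIR", "SOGAMOSO"), ("CCM PRAXAIR", "TOCANCIPA"),
   ("CCM PRAXAIR", "YUMBO"),
   ("CCM CHILCO", "CAZUCA"), ("CCM CHILCO", "FLORENCIA"), ("CCM CHILCO", "GIRARDOT"),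
   ("CCM CHILCO", "HISPANIA"), ("CCM CHILCO", "MADRID"), ("CCM CHILCO", "MARINILLA"),
   ("CCM CHILCO", "NEIVA"), ("CCM CHILCO", "YUMBO"),
   ("CHILCO", "CAZUCA"), ("CHILCO", "FLORENCIA"), ("CHILCO", "GIRARDOT"),
   ("CHILCO", "HISPANIA"), ("CHILCO", "MADRID"), ("CHILCO", "MARINILLA"),
   ("CHILCO", "NEIVA"), ("CHILCO", "YUMBO")]

def get_expected_sedes (cliente_nombre : String) : List String :=
  if cliente_nombre = "" then []
  else
    let c_key := PySem.Str.strip (PySem.Str.upper cliente_nombre)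
    let sedes := quotaMatrixKeys.foldl
      (fun (s : PySem.Set String) (p : String × String) =>
        if PySem.Str.isIn p.1 c_key then s.add p.2 else s)
      PySem.Set.empty
    -- sorted(list(sedes)): key .toList gives Python's code-point string order, kernel-reducible
    PySem.List.sorted sedes (fun x => x.toList) false

-- ===== PORT B =====
def lindeSorted : List String :=
  ["BARRANQUILLA", "BOGOTA", "CARTAGENA", "IBAGUE", "MEDELLIN",
   "PEREIRA", "POPAYAN", "SOGAMOSO", "TOCANCIPA", "YUMBO"]
def chilcoSorted : List String :=
  ["CAZUCA", "FLORENCIA", "GIRARDOT", "HISPANIA", "MADRID",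
   "MARINILLA", "NEIVA", "YUMBO"]
def bothSorted : List String :=
  ["BARRANQUILLA", "BOGOTA", "CARTAGENA", "CAZUCA", "FLORENCIA",
   "GIRARDOT", "HISPANIA", "IBAGUE", "MADRID", "MARINILLA",
   "MEDELLIN", "NEIVA", "PEREIRA", "POPAYAN", "SOGAMOSO",
   "TOCANCIPA", "YUMBO"]

def get_expected_sedes_alt (cliente_nombre : String) : List String :=
  if cliente_nombre = "" then []
  else
    let c_key := PySem.Str.strip (PySem.Str.upper cliente_nombre)
    -- "CCM CHILCO" in c_key implies "CHILCO" in c_key, so one test covers both keys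
    let linde := PySem.Str.isIn "CCM LINDE" c_key || PySem.Str.isIn "CCM PRAXAIR" c_key
    let chilco := PySem.Str.isIn "CHILCO" c_key
    if linde && chilco then bothSorted
    else if linde then lindeSorted
    else if chilco then chilcoSorted
    else []

-- ===== PRECONDITION & SPEC =====
def Spec_get_expected_sedes (cliente_nombre : String) (out : List String) : Prop := out = get_expected_sedes_alt cliente_nombre
instance (cliente_nombre : String) (out : List String) : Decidable (Spec_get_expected_sedes cliente_nombre out) := by unfold Spec_get_expected_sedes; infer_instance

-- ===== CLAIM (what is proved, stated in full; the proofs are below) =====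
def Claim_equal_get_expected_sedes : Prop := ∀ (cliente_nombre : String), Dom_get_expected_sedes cliente_nombre → Spec_get_expected_sedes cliente_nombre (get_expected_sedes cliente_nombre)

-- ===== LEMMAS AND PROOFS =====
-- "CCM CHILCO" ⊆ c implies "CHILCO" ⊆ c (substring containment is transitive)
lemma chilco_of_ccm_chilco (c : String)
    (h : PySem.Str.isIn "CCM CHILCO" c = true) : PySem.Str.isIn "CHILCO" c = true := by
  rw [PySem.Str.isIn_iff_infix] at h ⊢
  exact List.IsInfix.trans (by decide : ("CHILCO" : String).toList <:+: ("CCM CHILCO" : String).toList) h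

-- Both results are functions only of the four substring tests on c_key:
-- case-split on them and evaluate A's closed fold and B's branches.
lemma bodies_agree (c : String) :
    PySem.List.sorted
      (quotaMatrixKeys.foldl
        (fun (s : PySem.Set String) (p : String × String) =>
          if PySem.Str.isIn p.1 c then s.add p.2 else s)
        PySem.Set.empty) (fun x => x.toList) false
    = (let linde := PySem.Str.isIn "CCM LINDE" c || PySem.Str.isIn "CCM PRAXAIR" c
       let chilco := PySem.Str.isIn "CHILCO" c
       if linde && chilco then bothSorted
       else if linde then lindeSorted
       else if chilco then chilcoSorted
       else []) := by
  by_cases h1 : PySem.Str.isIn "CCM LINDE" c = true <;>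
  by_cases h2 : PySem.Str.isIn "CCM PRAXAIR" c = true <;>
  by_cases h3 : PySem.Str.isIn "CCM CHILCO" c = true <;>
  by_cases h4 : PySem.Str.isIn "CHILCO" c = true <;>
  first
  | (exact absurd (chilco_of_ccm_chilco c h3) h4)
  | (simp only [quotaMatrixKeys, List.foldl_cons, List.foldl_nil, h1, h2, h3, h4,
      Bool.false_eq_true, if_true, if_false, Bool.or_self, Bool.or_true, Bool.true_or,
      Bool.false_or, Bool.or_false, Bool.and_self, Bool.and_true, Bool.true_and,
      Bool.and_false, Bool.false_and] <;> decide)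

-- ===== VERDICT (by name: the statement is the Claim_ definition above) =====
theorem get_expected_sedes_spec : Claim_equal_get_expected_sedes := by
  intro s _
  unfold Spec_get_expected_sedes get_expected_sedes get_expected_sedes_alt
  by_cases h0 : s = ""
  · simp [h0]
  · simp only [if_neg h0]
    exact bodies_agree (PySem.Str.strip (PySem.Str.upper s))
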